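-- pv_equiv track=rewrite | github.com/mshonichev/tiden_examples_app | utils/convert-testplan-adoc-to-JIRA.py | process_monospace
-- ===== SOURCE A (Python) =====
-- def process_monospace(s):
--     # convert monospaced '`word`' to '{{word}}'
--     p = 0
--     r = ''
--     for c in s:
--         if p == 0:
--             if c == '`':
--                 p = 1
--                 c = '{{'
--         elif p == 1:
--             if c == '`':
--                 p = 0
--                 c = '}}'
--         r = r + c
--     return r
-- ===== SOURCE B (Python) =====
-- def process_monospace(s):
--     # segment-based: split on backticks, rejoin with alternating {{ / }} markers
--     parts = s.split('`')
--     return parts[0] + ''.join(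
--         ('{{' if i % 2 == 0 else '}}') + parts[i + 1]
--         for i in range(len(parts) - 1))
-- ===== Notes on version B (the rewrite author's own statement) =====
-- stated objective: faster
-- what changed: Replaced the per-character two-state machine that appends to a growing string with a split-on-backtick then rejoin: segments are reassembled with markers alternating by join index.
import Mathlib
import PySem

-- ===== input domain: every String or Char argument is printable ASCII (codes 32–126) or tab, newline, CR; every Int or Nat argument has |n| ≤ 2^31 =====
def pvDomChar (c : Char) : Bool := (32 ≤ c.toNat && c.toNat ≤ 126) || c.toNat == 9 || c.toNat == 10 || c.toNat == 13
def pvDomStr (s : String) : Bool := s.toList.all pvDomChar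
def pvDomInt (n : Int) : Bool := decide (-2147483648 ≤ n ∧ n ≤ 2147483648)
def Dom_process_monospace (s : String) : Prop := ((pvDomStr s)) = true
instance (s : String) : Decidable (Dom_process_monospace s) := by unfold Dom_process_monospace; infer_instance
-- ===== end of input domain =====

-- B replaces A's per-character two-state machine by split-on-backtick plus rejoin with alternating markers (simpler decomposition).


-- ===== PORT A =====
-- one step of A's loop: state p (0 = outside backticks, 1 = inside), accumulated r
def pmStep (st : Nat × List Char) (c : Char) : Nat × List Char :=
  if st.1 = 0 then
    if c = '`' then (1, st.2 ++ ['{', '{']) else (st.1, st.2 ++ [c])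
  else
    if c = '`' then (0, st.2 ++ ['}', '}']) else (st.1, st.2 ++ [c])

def process_monospace (s : String) : String :=
  String.ofList (s.toList.foldl pmStep (0, [])).2

-- ===== PORT B =====
-- parts[0] is safe in Python (split never returns an empty list), hence headD/getD here
def process_monospace_alt (s : String) : String :=
  let parts := PySem.Chars.splitOn s.toList ['`']
  String.ofList (parts.headD [] ++ PySem.Chars.join []
    ((List.range (parts.length - 1)).map (fun i =>
      (if i % 2 = 0 then ['{', '{'] else ['}', '}']) ++ parts.getD (i + 1) [])))

-- ===== PRECONDITION & SPEC =====
def Spec_process_monospace (s : String) (out : String) : Prop := out = process_monospace_alt s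
instance (s : String) (out : String) : Decidable (Spec_process_monospace s out) := by unfold Spec_process_monospace; infer_instance

-- ===== CLAIM (what is proved, stated in full; the proofs are below) =====
def Claim_equal_process_monospace : Prop := ∀ (s : String), Dom_process_monospace s → Spec_process_monospace s (process_monospace s)

-- ===== LEMMAS AND PROOFS =====

-- clean recursive characterization of split on a single backtick
def split1 : List Char → List (List Char)
  | [] => [[]]
  | c :: t => if c = '`' then [] :: split1 t
              else match split1 t with
                   | [] => [[c]]
                   | x :: r => (c :: x) :: r

theorem split1_ne_nil (l : List Char) : split1 l ≠ [] := by
  induction l with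
  | nil => simp [split1]
  | cons c t ih =>
    simp only [split1]
    split_ifs
    · simp
    · cases h : split1 t <;> simp

theorem splitOn_go_eq (l : List Char) : ∀ (fuel : Nat) (cur : List Char) (acc : List (List Char)),
    l.length < fuel →
    PySem.Chars.splitOn.go ['`'] fuel l cur acc
      = acc.reverse ++ (split1 l).modifyHead (cur.reverse ++ ·) := by
  induction l with
  | nil =>
    intro fuel cur acc h
    match fuel with
    | fuel + 1 => simp [PySem.Chars.splitOn.go, split1]
  | cons c t ih =>
    intro fuel cur acc h
    match fuel with
    | fuel + 1 =>
      by_cases hc : c = '`'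
      · subst hc
        have : (['`'] : List Char).isPrefixOf ('`' :: t) = true := by simp [List.isPrefixOf]
        simp only [PySem.Chars.splitOn.go, this, if_pos, List.length_cons,
          List.length_nil, Nat.zero_add, List.drop_succ_cons, List.drop_zero] at *
        rw [ih fuel [] (cur.reverse :: acc) (by omega)]
        rcases hsp : split1 t with _ | ⟨a, b⟩ <;> simp [split1, hsp]
      · have : (['`'] : List Char).isPrefixOf (c :: t) = false := by
          simp only [List.isPrefixOf, Bool.and_eq_false_iff, beq_eq_false_iff_ne, ne_eq]
          left
          intro hcc
          exact absurd hcc.symm hc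
        simp only [PySem.Chars.splitOn.go, this, Bool.false_eq_true, if_false]
        rw [ih fuel (c :: cur) acc (by simp at h; omega)]
        simp only [split1, hc, if_false]
        rcases hs : split1 t with _ | ⟨x, r⟩
        · exact absurd hs (split1_ne_nil t)
        · simp

theorem splitOn_eq_split1 (l : List Char) : PySem.Chars.splitOn l ['`'] = split1 l := by
  show PySem.Chars.splitOn.go ['`'] (l.length + 1) l [] [] = _
  rw [splitOn_go_eq l (l.length + 1) [] [] (by omega)]
  rcases split1 l with _ | ⟨a, b⟩ <;> simp

-- pure form of A's loop
def goA : Nat → List Char → List Char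
  | _, [] => []
  | 0, c :: t => if c = '`' then '{' :: '{' :: goA 1 t else c :: goA 0 t
  | p + 1, c :: t => if c = '`' then '}' :: '}' :: goA 0 t else c :: goA (p + 1) t

theorem foldl_pmStep (l : List Char) : ∀ (p : Nat) (r : List Char),
    (l.foldl pmStep (p, r)).2 = r ++ goA p l := by
  induction l with
  | nil => intro p r; simp [goA]
  | cons c t ih =>
    intro p r
    match p with
    | 0 =>
      by_cases hc : c = '`' <;>
        simp [pmStep, hc, goA, ih]
    | p + 1 =>
      by_cases hc : c = '`' <;>
        simp [pmStep, hc, goA, ih]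

-- alternating rejoin of the split tail
def pairs : Bool → List (List Char) → List Char
  | _, [] => []
  | b, x :: t => (if b then ['{', '{'] else ['}', '}']) ++ x ++ pairs (!b) t

theorem goA_eq_pairs (l : List Char) :
    goA 0 l = (split1 l).headD [] ++ pairs true (split1 l).tail ∧
    goA 1 l = (split1 l).headD [] ++ pairs false (split1 l).tail := by
  induction l with
  | nil => simp [goA, split1, pairs]
  | cons c t ih =>
    obtain ⟨ih0, ih1⟩ := ih
    rcases hs : split1 t with _ | ⟨x, r⟩
    · exact absurd hs (split1_ne_nil t)
    · rw [hs] at ih0 ih1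
      by_cases hc : c = '`'
      · subst hc
        constructor <;> simp [goA, split1, hs, pairs, ih0, ih1]
      · constructor <;> simp [goA, hc, split1, hs, ih0, ih1]

theorem join_range_pairs (t : List (List Char)) : ∀ (b : Bool),
    PySem.Chars.join []
      ((List.range t.length).map (fun i =>
        (if decide (i % 2 = 0) = b then ['{', '{'] else ['}', '}']) ++ t.getD i [])) =
    pairs b t := by
  induction t with
  | nil => intro b; simp [pairs, PySem.Chars.join_nil]
  | cons x r ih =>
    intro b
    rw [List.length_cons, List.range_succ_eq_map, List.map_cons, List.map_map]
    have hmap : ((List.range r.length).map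
        ((fun i => (if decide (i % 2 = 0) = b then ['{', '{'] else ['}', '}'])
          ++ (x :: r).getD i []) ∘ Nat.succ))
        = (List.range r.length).map (fun i =>
            (if decide (i % 2 = 0) = !b then ['{', '{'] else ['}', '}']) ++ r.getD i []) := by
      apply List.map_congr_left
      intro i _
      simp only [Function.comp]
      have : decide ((i + 1) % 2 = 0) = !decide (i % 2 = 0) := by
        rcases Nat.mod_two_eq_zero_or_one i with h | h <;> simp [Nat.add_mod, h]
      simp only [Nat.succ_eq_add_one, this, List.getD_cons_succ]
      rcases b <;> rcases hb : decide (i % 2 = 0) <;> simp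
    rw [hmap]
    rcases hr : r with _ | ⟨y, r'⟩
    · simp [pairs, PySem.Chars.join_singleton]
    · rw [← hr]
      have hne : (List.range r.length).map (fun i =>
          (if decide (i % 2 = 0) = !b then ['{', '{'] else ['}', '}']) ++ r.getD i []) ≠ [] := by
        subst hr; simp
      rcases hj : (List.range r.length).map (fun i =>
          (if decide (i % 2 = 0) = !b then ['{', '{'] else ['}', '}']) ++ r.getD i []) with _ | ⟨z, zs⟩
      · exact absurd hj hne
      · rw [PySem.Chars.join_cons_cons, ← hj, ih]
        simp [pairs]

-- ===== VERDICT (by name: the statement is the Claim_ definition above) =====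
theorem process_monospace_spec : Claim_equal_process_monospace := by
  intro s _
  show _ = _
  unfold process_monospace process_monospace_alt
  rw [foldl_pmStep, splitOn_eq_split1]
  rcases hs : split1 s.toList with _ | ⟨x, r⟩
  · exact absurd hs (split1_ne_nil _)
  · have h0 := (goA_eq_pairs s.toList).1
    rw [hs] at h0
    have hjr := join_range_pairs r true
    have hcond : ((List.range r.length).map (fun i =>
        (if i % 2 = 0 then ['{', '{'] else ['}', '}']) ++ r.getD i []))
        = (List.range r.length).map (fun i =>
        (if decide (i % 2 = 0) = true then ['{', '{'] else ['}', '}']) ++ r.getD i []) := by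
      simp
    simp only [List.nil_append, h0, List.length_cons, Nat.add_sub_cancel, List.headD_cons,
      List.tail_cons]
    congr 1
    have : ∀ i, (x :: r).getD (i + 1) ([] : List Char) = r.getD i [] := by intro i; simp
    simp only [this]
    rw [hcond, hjr]
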